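-- pv_equiv track=rewrite | github.com/FanisNgv/ITMO_Algorithms | Lab5_HashFunctions/algo_5.4.py | get_pref_hash
-- ===== SOURCE A (Python) =====
-- M = 10**9 + 7
--
-- p = 256
--
-- def get_pref_hash(string):
--     pref_hash = [0] * (len(string) + 1)
--
--     for i in range(1, len(string)+1):
--         if i == 1:
--             pref_hash[i] = ord(string[i-1])*pow(p, i - 1)
--         else:
--             pref_hash[i] = (pref_hash[i - 1]*p + ord(string[i-1])*pow(p, 0)) % M
--
--     return pref_hash
-- ===== SOURCE B (Python) =====
-- M = 10**9 + 7
--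
-- p = 256
--
-- def get_pref_hash(string):
--     # each prefix hash directly from the polynomial definition (textbook form)
--     return [sum(ord(string[j]) * pow(p, i - 1 - j, M) for j in range(i)) % M
--             for i in range(len(string) + 1)]
-- ===== Notes on version B (the rewrite author's own statement) =====
-- stated objective: alternative
-- what changed: Replaces A's incremental Horner recurrence that mutates a preallocated array with a direct evaluation of each prefix's polynomial hash as an explicit sum of ord(s[j])*p^(i-1-j) mod M, built as a list comprehension.
import Mathlib
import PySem

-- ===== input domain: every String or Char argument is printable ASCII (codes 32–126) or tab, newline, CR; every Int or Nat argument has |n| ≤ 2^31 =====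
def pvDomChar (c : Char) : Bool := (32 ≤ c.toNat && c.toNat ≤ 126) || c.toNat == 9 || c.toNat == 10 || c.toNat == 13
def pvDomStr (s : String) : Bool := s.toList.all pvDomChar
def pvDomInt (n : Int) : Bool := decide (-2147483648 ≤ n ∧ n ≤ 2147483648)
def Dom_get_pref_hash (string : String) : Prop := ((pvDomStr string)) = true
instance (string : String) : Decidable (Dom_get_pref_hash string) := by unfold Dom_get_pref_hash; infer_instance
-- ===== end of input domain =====

-- B computes each prefix hash directly from the polynomial definition (nested sum)
-- instead of A's incremental Horner recurrence over a mutated array; objective: alternative.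

-- ===== PORT A =====
def get_pref_hash (string : String) : List Int :=
  (PySem.List.pyRange 1 ((string.toList.length : Int) + 1)).foldl
    (fun pref i =>
      if i == 1 then
        pref.set i.toNat
          (PySem.List.pyGetD (string.toList.map (fun c => (c.toNat : Int))) (i - 1) 0 *
            256 ^ (i - 1).toNat)
      else
        pref.set i.toNat
          (PySem.Int.mod
            (PySem.List.pyGetD pref (i - 1) 0 * 256 +
              PySem.List.pyGetD (string.toList.map (fun c => (c.toNat : Int))) (i - 1) 0 *
                256 ^ (0 : Nat)) 1000000007))
    (List.replicate (string.toList.length + 1) 0)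

-- ===== PORT B =====
def get_pref_hash_alt (string : String) : List Int :=
  (PySem.List.pyRange 0 ((string.toList.length : Int) + 1)).map (fun i =>
    PySem.Int.mod
      (((PySem.List.pyRange 0 i).map (fun j =>
          PySem.List.pyGetD (string.toList.map (fun c => (c.toNat : Int))) j 0 *
            PySem.Int.powMod 256 (i - 1 - j).toNat 1000000007)).sum)
      1000000007)

-- ===== PRECONDITION & SPEC =====
def Spec_get_pref_hash (string : String) (out : List Int) : Prop := out = get_pref_hash_alt string
instance (string : String) (out : List Int) : Decidable (Spec_get_pref_hash string out) := by unfold Spec_get_pref_hash; infer_instance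

-- ===== CLAIM (what is proved, stated in full; the proofs are below) =====
def Claim_equal_get_pref_hash : Prop := ∀ (string : String), Dom_get_pref_hash string → Spec_get_pref_hash string (get_pref_hash string)

-- ===== LEMMAS AND PROOFS =====

-- A's recurrence as a function on the prefix length
def hA (os : List Int) : Nat → Int
  | 0 => 0
  | 1 => os.getD 0 0
  | (k + 2) => PySem.Int.mod (hA os (k + 1) * 256 + os.getD (k + 1) 0) 1000000007

-- the unmodded polynomial value of the length-i prefix
def polyT (os : List Int) (i : Nat) : Int :=
  ((List.range i).map (fun j => os.getD j 0 * 256 ^ (i - 1 - j))).sum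

-- B's value at prefix length i (inner factors reduced mod M, as pow(p,e,M) does)
def bm (os : List Int) (i : Nat) : Int :=
  PySem.Int.mod
    (((List.range i).map (fun j =>
        os.getD j 0 * PySem.Int.mod (256 ^ (i - 1 - j)) 1000000007)).sum)
    1000000007

theorem sum_modeq (l : List Nat) (f g : Nat → Int)
    (h : ∀ j ∈ l, f j ≡ g j [ZMOD 1000000007]) :
    (l.map f).sum ≡ (l.map g).sum [ZMOD 1000000007] := by
  induction l with
  | nil => simp [Int.ModEq.refl]
  | cons a t ih =>
    simp only [List.map_cons, List.sum_cons]
    exact (h a (by simp)).add (ih (fun j hj => h j (by simp [hj])))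

theorem bm_eq_polyT_mod (os : List Int) (i : Nat) :
    bm os i = PySem.Int.mod (polyT os i) 1000000007 := by
  unfold bm polyT
  have h : ((List.range i).map (fun j =>
      os.getD j 0 * PySem.Int.mod (256 ^ (i - 1 - j)) 1000000007)).sum ≡
      ((List.range i).map (fun j => os.getD j 0 * 256 ^ (i - 1 - j))).sum
      [ZMOD 1000000007] := by
    apply sum_modeq
    intro j _
    have : PySem.Int.mod ((256:Int) ^ (i - 1 - j)) 1000000007 ≡ 256 ^ (i - 1 - j)
        [ZMOD 1000000007] := by
      rw [PySem.Int.mod_eq_emod_of_pos (by norm_num)]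
      exact Int.emod_emod_of_dvd _ dvd_rfl
    exact this.mul_left _
  rw [PySem.Int.mod_eq_emod_of_pos (by norm_num),
      PySem.Int.mod_eq_emod_of_pos (by norm_num)]
  exact h

theorem polyT_succ (os : List Int) (k : Nat) :
    polyT os (k + 1) = polyT os k * 256 + os.getD k 0 := by
  unfold polyT
  rw [List.range_succ, List.map_append, List.sum_append]
  simp only [List.map_cons, List.map_nil, List.sum_cons, List.sum_nil]
  have h : (List.range k).map (fun j => os.getD j 0 * 256 ^ (k + 1 - 1 - j)) =
      (List.range k).map (fun j => os.getD j 0 * 256 ^ (k - 1 - j) * 256) := by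
    apply List.map_congr_left
    intro j hj
    have hjk : j < k := List.mem_range.mp hj
    have : k + 1 - 1 - j = (k - 1 - j) + 1 := by omega
    rw [this, pow_succ]; ring
  rw [h]
  have : ((List.range k).map (fun j => os.getD j 0 * 256 ^ (k - 1 - j) * 256)).sum =
      ((List.range k).map (fun j => os.getD j 0 * 256 ^ (k - 1 - j))).sum * 256 := by
    induction (List.range k) with
    | nil => simp
    | cons a t ih => simp only [List.map_cons, List.sum_cons]; rw [ih]; ring
  rw [this]
  have : k + 1 - 1 - k = 0 := by omega
  rw [this]
  ring

theorem hA_eq_bm (os : List Int) (hos : ∀ x ∈ os, 0 ≤ x ∧ x < 1000000007) :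
    ∀ i, i ≤ os.length → hA os i = bm os i := by
  intro i
  induction i with
  | zero => intro _; simp [hA, bm]
  | succ k ih =>
    intro hk
    match k, ih with
    | 0, _ =>
      -- i = 1
      have h0 : os.getD 0 0 ∈ os := by
        cases os with
        | nil => simp at hk
        | cons a t => simp
      obtain ⟨h1, h2⟩ := hos _ h0
      rw [bm_eq_polyT_mod]
      have hp : polyT os 1 = os.getD 0 0 := by unfold polyT; simp
      rw [hp, PySem.Int.mod_eq_emod_of_pos (by norm_num)]
      show os.getD 0 0 = _
      exact (Int.emod_eq_of_lt h1 h2).symm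
    | (m + 1), ih =>
      -- i = m + 2
      have hm : m + 1 ≤ os.length := by omega
      rw [bm_eq_polyT_mod, polyT_succ]
      show PySem.Int.mod (hA os (m + 1) * 256 + os.getD (m + 1) 0) 1000000007 = _
      rw [ih hm, bm_eq_polyT_mod]
      rw [PySem.Int.mod_eq_emod_of_pos (by norm_num),
          PySem.Int.mod_eq_emod_of_pos (by norm_num),
          PySem.Int.mod_eq_emod_of_pos (by norm_num)]
      have h1 : polyT os (m + 1) % 1000000007 ≡ polyT os (m + 1)
          [ZMOD 1000000007] := Int.emod_emod_of_dvd _ dvd_rfl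
      exact ((h1.mul_right 256).add_right _)

-- B's port, rewritten as a map of bm over List.range
theorem alt_eq_map (string : String) :
    get_pref_hash_alt string =
      (List.range (string.toList.length + 1)).map
        (bm (string.toList.map (fun c => (c.toNat : Int)))) := by
  unfold get_pref_hash_alt
  set os := string.toList.map (fun c => (c.toNat : Int)) with hos
  have hl : string.toList.length = os.length := by simp [hos]
  rw [hl]
  have hlen : ((os.length : Int) + 1) = ((os.length + 1 : Nat) : Int) := by push_cast; ring
  rw [hlen, PySem.List.pyRange_zero_nat, List.map_map]
  apply List.map_congr_left
  intro i hi
  simp only [Function.comp]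
  unfold bm
  congr 1
  rw [PySem.List.pyRange_zero_nat, List.map_map]
  congr 1
  apply List.map_congr_left
  intro j hj
  have hji : j < i := List.mem_range.mp hj
  simp only [Function.comp]
  rw [PySem.List.pyGetD_natCast]
  congr 2
  omega

-- the state of A's loop after processing i = 1 .. k
theorem A_loop (os : List Int) (n : Nat) (hn : n = os.length) :
    ∀ k, k ≤ n →
      (PySem.List.pyRange 1 ((k : Int) + 1)).foldl
        (fun pref i =>
          if i == 1 then
            pref.set i.toNat (PySem.List.pyGetD os (i - 1) 0 * 256 ^ (i - 1).toNat)
          else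
            pref.set i.toNat
              (PySem.Int.mod
                (PySem.List.pyGetD pref (i - 1) 0 * 256 +
                  PySem.List.pyGetD os (i - 1) 0 * 256 ^ (0 : Nat)) 1000000007))
        (List.replicate (n + 1) 0) =
      (List.range (k + 1)).map (hA os) ++ List.replicate (n - k) 0 := by
  intro k
  induction k with
  | zero =>
    intro _
    rw [show ((0 : Nat) : Int) + 1 = 1 by norm_num, PySem.List.pyRange_one_eq_nil (by norm_num)]
    simp [hA, List.replicate_succ]
  | succ k ih =>
    intro hk
    have hk' : k ≤ n := by omega
    have hcast : ((k + 1 : Nat) : Int) + 1 = ((k : Int) + 1) + 1 := by omega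
    rw [hcast, PySem.List.pyRange_one_succ_right (by omega), List.foldl_append, ih hk']
    simp only [List.foldl_cons, List.foldl_nil]
    by_cases hk1 : k = 0
    · subst hk1
      -- first iteration: i = 1
      simp only [show ((0:Nat):Int) + 1 = 1 by norm_num]
      rw [if_pos (by decide)]
      have h1 : ((1 : Int)).toNat = 1 := by decide
      have h2 : ((1 : Int)) - 1 = ((0 : Nat) : Int) := by norm_num
      rw [h1, h2, PySem.List.pyGetD_natCast]
      have hn1 : 1 ≤ n := by omega
      have hrep : (List.range 1).map (hA os) ++ List.replicate (n - 0) 0 =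
          (0 : Int) :: List.replicate n 0 := by simp [hA]
      rw [hrep]
      cases n with
      | zero => omega
      | succ m =>
        simp [List.replicate_succ, List.range_succ, hA, List.set_cons_succ, List.set_cons_zero]
    · -- i = k + 1 ≥ 2
      have hk2 : 2 ≤ k + 1 := by omega
      rw [if_neg (by simp; omega)]
      have ht : ((k : Int) + 1).toNat = k + 1 := by omega
      have hi1 : ((k : Int) + 1) - 1 = ((k : Nat) : Int) := by omega
      rw [ht, hi1, PySem.List.pyGetD_natCast, PySem.List.pyGetD_natCast]
      -- reading index k of the state: it is hA os k
      have hread : ((List.range (k + 1)).map (hA os) ++ List.replicate (n - k) 0).getD k 0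
          = hA os k := by
        rw [List.getD_append _ _ _ _ (by simp)]
        simp [List.getD_eq_getElem?_getD]
      rw [hread]
      -- writing index k+1: head of the replicate part
      rw [List.set_append]
      have hlen1 : ((List.range (k + 1)).map (hA os)).length = k + 1 := by simp
      rw [if_neg (by rw [hlen1]; omega), hlen1]
      have hsub : k + 1 - (k + 1) = 0 := by omega
      rw [hsub]
      have hnk : n - k = (n - (k + 1)) + 1 := by omega
      rw [hnk, List.replicate_succ, List.set_cons_zero]
      rw [List.range_succ (n := k + 1), List.map_append]
      rw [List.append_assoc]
      congr 1
      simp only [List.map_cons, List.map_nil, List.cons_append, List.nil_append]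
      congr 1
      match k, hk1 with
      | (m + 1), _ => simp [hA]

theorem A_eq_map (string : String) :
    get_pref_hash string =
      (List.range (string.toList.length + 1)).map
        (hA (string.toList.map (fun c => (c.toNat : Int)))) := by
  unfold get_pref_hash
  set os := string.toList.map (fun c => (c.toNat : Int)) with hos
  have hl : string.toList.length = os.length := by simp [hos]
  rw [hl]
  exact A_loop os os.length rfl os.length le_rfl |>.trans (by simp)

-- ===== VERDICT (by name: the statement is the Claim_ definition above) =====
theorem get_pref_hash_spec : Claim_equal_get_pref_hash := by
  intro string hdom
  unfold Spec_get_pref_hash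
  rw [A_eq_map, alt_eq_map]
  apply List.map_congr_left
  intro i hi
  have hin : i < string.toList.length + 1 := List.mem_range.mp hi
  apply hA_eq_bm
  · intro x hx
    simp only [List.mem_map] at hx
    obtain ⟨c, hc, rfl⟩ := hx
    have : pvDomChar c = true := by
      unfold Dom_get_pref_hash pvDomStr at hdom
      exact List.all_eq_true.mp hdom c hc
    unfold pvDomChar at this
    simp only [Bool.or_eq_true, Bool.and_eq_true, decide_eq_true_eq, beq_iff_eq] at this
    constructor
    · positivity
    · omega
  · simp only [List.length_map]; omega
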